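-- pv_equiv track=rewrite | github.com/kurtbrian03/Finanzas | integrar_dropbox.py | _comparar_hashes
-- ===== SOURCE A (Python) =====
-- def _comparar_hashes(prev: list[dict[str, object]], curr: list[dict[str, object]]) -> dict[str, int]:
--     prev_map = {str(r.get("ruta_completa", "")): str(r.get("sha256", "")) for r in prev}
--     curr_map = {str(r.get("ruta_completa", "")): str(r.get("sha256", "")) for r in curr}
--
--     rutas_prev = set(prev_map.keys())
--     rutas_curr = set(curr_map.keys())
--
--     nuevos = rutas_curr - rutas_prev
--     eliminados = rutas_prev - rutas_curr
--     modificados = {r for r in rutas_curr & rutas_prev if prev_map.get(r) != curr_map.get(r)}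
--
--     return {
--         "nuevos": len(nuevos),
--         "eliminados": len(eliminados),
--         "modificados": len(modificados),
--     }
-- ===== SOURCE B (Python) =====
-- def _comparar_hashes(prev: list[dict[str, object]], curr: list[dict[str, object]]) -> dict[str, int]:
--     def snapshot(rows):
--         s = sorted(
--             ((str(r.get("ruta_completa", "")), str(r.get("sha256", ""))) for r in rows),
--             key=lambda p: p[0],
--         )
--         # stable sort: within equal paths original order is kept, so the last
--         # element of each equal-path run is the last occurrence (dict last-wins)
--         keep = [p for p, q in zip(s, s[1:]) if p[0] != q[0]]
--         if s:
--             keep.append(s[-1])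
--         return keep
--
--     pm = snapshot(prev)
--     cm = snapshot(curr)
--     nuevos = eliminados = modificados = 0
--     i = j = 0
--     while i < len(pm) and j < len(cm):
--         pr, ps = pm[i]
--         cr, cs = cm[j]
--         if pr < cr:
--             eliminados += 1
--             i += 1
--         elif cr < pr:
--             nuevos += 1
--             j += 1
--         else:
--             if ps != cs:
--                 modificados += 1
--             i += 1
--             j += 1
--     eliminados += len(pm) - i
--     nuevos += len(cm) - j
--     return {"nuevos": nuevos, "eliminados": eliminados, "modificados": modificados}
-- ===== Notes on version B (the rewrite author's own statement) =====
-- stated objective: alternative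
-- what changed: B replaces A's hash-based approach (two dicts plus set differences/intersection) by a sort-and-merge algorithm: it stable-sorts the (path,sha) pairs by path, keeps the last pair of each equal-path run (reproducing dict last-wins dedup), and counts nuevos/eliminados/modificados with a single two-pointer merge of the two sorted snapshots, building no dict or set at all.
import Mathlib
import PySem

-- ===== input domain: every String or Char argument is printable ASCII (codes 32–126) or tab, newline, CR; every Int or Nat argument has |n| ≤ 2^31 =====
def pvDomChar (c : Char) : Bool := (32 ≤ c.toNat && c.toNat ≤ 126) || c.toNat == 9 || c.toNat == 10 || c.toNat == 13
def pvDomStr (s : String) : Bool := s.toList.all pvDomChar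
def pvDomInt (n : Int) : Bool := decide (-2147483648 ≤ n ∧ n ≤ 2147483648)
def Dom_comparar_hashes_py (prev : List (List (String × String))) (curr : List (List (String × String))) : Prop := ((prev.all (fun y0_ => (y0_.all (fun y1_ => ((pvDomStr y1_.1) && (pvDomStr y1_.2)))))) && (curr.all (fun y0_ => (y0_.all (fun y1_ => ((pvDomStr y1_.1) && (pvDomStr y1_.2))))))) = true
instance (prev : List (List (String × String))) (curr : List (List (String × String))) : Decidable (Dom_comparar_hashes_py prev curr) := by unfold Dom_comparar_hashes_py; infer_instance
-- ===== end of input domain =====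

-- B replaces A's dict/set machinery by a sort-and-merge algorithm (objective: alternative, not faster).

-- ===== PORT A =====
-- r.get(key, dflt) on a row dict (association list, first match)
def pvRowGet (r : List (String × String)) (k : String) (dflt : String) : String :=
  match r.find? (fun p => p.1 == k) with
  | some p => p.2
  | none => dflt

-- the dict comprehension {str(r.get("ruta_completa","")): str(r.get("sha256","")) for r in rows}
-- (str() is the identity on these String values)
def pvBuildMap (rows : List (List (String × String))) : PySem.Dict String String :=
  rows.foldl (fun d r => d.insert (pvRowGet r "ruta_completa" "") (pvRowGet r "sha256" "")) PySem.Dict.empty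

def comparar_hashes_py (prev : List (List (String × String))) (curr : List (List (String × String))) : List (String × Int) :=
  let prev_map := pvBuildMap prev
  let curr_map := pvBuildMap curr
  let rutas_prev : PySem.Set String := PySem.Set.ofList prev_map.keys
  let rutas_curr : PySem.Set String := PySem.Set.ofList curr_map.keys
  let nuevos : PySem.Set String := PySem.Set.diff rutas_curr rutas_prev
  let eliminados : PySem.Set String := PySem.Set.diff rutas_prev rutas_curr
  -- set comprehension consumed only through len, so its (unmodelled) iteration order is irrelevant
  let modificados : PySem.Set String :=
    PySem.Set.ofList ((PySem.Set.inter rutas_curr rutas_prev).filter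
      (fun r => !(prev_map.get? r == curr_map.get? r)))
  [("nuevos", PySem.Set.len nuevos), ("eliminados", PySem.Set.len eliminados),
   ("modificados", PySem.Set.len modificados)]

-- ===== PORT B =====
-- the generator (str(r.get("ruta_completa","")), str(r.get("sha256",""))) for r in rows
def pvPairs (rows : List (List (String × String))) : List (String × String) :=
  rows.map (fun r => (pvRowGet r "ruta_completa" "", pvRowGet r "sha256" ""))

-- keep = [p for p, q in zip(s, s[1:]) if p[0] != q[0]]; if s: keep.append(s[-1])
def pvKeepLast (s : List (String × String)) : List (String × String) :=
  (((s.zip (s.drop 1)).filter (fun pq => pq.1.1 != pq.2.1)).map (fun pq => pq.1)) ++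
    (match s.getLast? with
     | some x => [x]   -- s[-1] of a nonempty s
     | none => [])

def pvSnapshot (rows : List (List (String × String))) : List (String × String) :=
  pvKeepLast (PySem.List.sorted (pvPairs rows) (fun p => p.1) false)

-- the while loop over indices i, j plus the two trailing adjustments
def pvMergeCount : List (String × String) → List (String × String) → Int → Int → Int → Int × Int × Int
  | [], cm, n, e, m => (n + cm.length, e, m)
  | pm@(_ :: _), [], n, e, m => (n, e + pm.length, m)
  | (pr, ps) :: pt, (cr, cs) :: ct, n, e, m =>
    if pr < cr then pvMergeCount pt ((cr, cs) :: ct) n (e + 1) m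
    else if cr < pr then pvMergeCount ((pr, ps) :: pt) ct (n + 1) e m
    else if ps != cs then pvMergeCount pt ct n e (m + 1)
    else pvMergeCount pt ct n e m
termination_by pm cm _ _ _ => pm.length + cm.length

def comparar_hashes_py_alt (prev : List (List (String × String))) (curr : List (List (String × String))) : List (String × Int) :=
  let pm := pvSnapshot prev
  let cm := pvSnapshot curr
  let t := pvMergeCount pm cm 0 0 0
  [("nuevos", t.1), ("eliminados", t.2.1), ("modificados", t.2.2)]

-- ===== PRECONDITION & SPEC =====
def Spec_comparar_hashes_py (prev : List (List (String × String))) (curr : List (List (String × String))) (out : List (String × Int)) : Prop := out = comparar_hashes_py_alt prev curr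
instance (prev : List (List (String × String))) (curr : List (List (String × String))) (out : List (String × Int)) : Decidable (Spec_comparar_hashes_py prev curr out) := by unfold Spec_comparar_hashes_py; infer_instance

-- ===== CLAIM (what is proved, stated in full; the proofs are below) =====
def Claim_equal_comparar_hashes_py : Prop := ∀ (prev : List (List (String × String))) (curr : List (List (String × String))), Dom_comparar_hashes_py prev curr → Spec_comparar_hashes_py prev curr (comparar_hashes_py prev curr)

-- ===== LEMMAS AND PROOFS =====

-- small Bool helpers about List.contains on key lists
theorem pv_contains_false (K : List String) (a : String) (h : a ∉ K) : K.contains a = false := by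
  simp [h]

theorem pv_contains_cons_ne (K : List String) (a b : String) (h : b ≠ a) :
    (a :: K).contains b = K.contains b := by
  simp [h]

theorem pv_contains_eq_of_iff (K L : List String) (h : ∀ x, x ∈ K ↔ x ∈ L) (a : String) :
    K.contains a = L.contains a := by
  by_cases hm : a ∈ K
  · simp [hm, (h a).1 hm]
  · have hl : a ∉ L := fun hl => hm ((h a).2 hl)
    simp [hm, hl]

theorem pv_find?_none (l : List (String × String)) (k : String) (h : ∀ p ∈ l, k ≠ p.1) :
    l.find? (fun q => q.1 == k) = none := by
  rw [List.find?_eq_none]; intro p hp; simp [(h p hp).symm]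

-- structural equations of pvKeepLast
theorem pvKL_nil : pvKeepLast [] = [] := rfl

theorem pvKL_single (p : String × String) : pvKeepLast [p] = [p] := rfl

theorem pvKL_cons2 (p q : String × String) (t : List (String × String)) :
    pvKeepLast (p :: q :: t) = (if p.1 == q.1 then [] else [p]) ++ pvKeepLast (q :: t) := by
  obtain ⟨x, hx⟩ : ∃ x, (q :: t).getLast? = some x := by
    cases h : (q :: t).getLast? with
    | none => exact absurd h (by simp)
    | some x => exact ⟨x, rfl⟩
  have hx' : (p :: q :: t).getLast? = some x := by
    rw [List.getLast?_cons_cons]; exact hx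
  by_cases h : p.1 == q.1 <;>
    simp [pvKeepLast, hx, hx', h, bne]

theorem pvKL_subset (s : List (String × String)) : ∀ x ∈ pvKeepLast s, x ∈ s := by
  induction s with
  | nil => simp [pvKL_nil]
  | cons p s ih =>
    cases s with
    | nil => simp [pvKL_single]
    | cons q t =>
      intro x hx
      rw [pvKL_cons2] at hx
      rcases List.mem_append.1 hx with h | h
      · by_cases hpq : p.1 == q.1 <;> simp [hpq] at h
        simp [h]
      · exact List.mem_cons_of_mem _ (ih x h)

theorem pvKL_pairwise (s : List (String × String))
    (h : s.Pairwise (fun a b => a.1 ≤ b.1)) :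
    (pvKeepLast s).Pairwise (fun a b => a.1 < b.1) := by
  induction s with
  | nil => simp [pvKL_nil]
  | cons p s ih =>
    cases s with
    | nil => simp [pvKL_single]
    | cons q t =>
      rw [pvKL_cons2]
      rcases List.pairwise_cons.1 h with ⟨hp, htl⟩
      by_cases hpq : p.1 == q.1
      · simpa [hpq] using ih htl
      · have hif : (if p.1 == q.1 then ([] : List (String × String)) else [p]) = [p] := by
          simp [hpq]
        have hlt : p.1 < q.1 := lt_of_le_of_ne (hp q (by simp)) (by simpa using hpq)
        rw [hif, List.singleton_append, List.pairwise_cons]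
        refine ⟨?_, ih htl⟩
        intro r hr
        have hrm : r ∈ q :: t := pvKL_subset _ r hr
        rcases List.mem_cons.1 hrm with rfl | hrt
        · exact hlt
        · exact lt_of_lt_of_le hlt ((List.pairwise_cons.1 htl).1 r hrt)

-- lookup in the kept list = last matching pair of the sorted list
theorem pvKL_find (s : List (String × String))
    (h : s.Pairwise (fun a b => a.1 ≤ b.1)) (k : String) :
    (pvKeepLast s).find? (fun p => p.1 == k) = (s.filter (fun p => p.1 == k)).getLast? := by
  induction s with
  | nil => simp [pvKL_nil]
  | cons p s ih =>
    cases s with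
    | nil =>
      rw [pvKL_single]
      by_cases hk : p.1 == k
      · rw [List.find?_cons_of_pos (p := fun q : String × String => q.1 == k) hk,
            List.filter_cons_of_pos (p := fun q : String × String => q.1 == k) hk]; rfl
      · rw [List.find?_cons_of_neg (p := fun q : String × String => q.1 == k) hk,
            List.filter_cons_of_neg (p := fun q : String × String => q.1 == k) hk]; rfl
    | cons q t =>
      rw [pvKL_cons2]
      rcases List.pairwise_cons.1 h with ⟨hp, htl⟩
      by_cases hpq : p.1 == q.1
      · have hpq' : p.1 = q.1 := by simpa using hpq
        have hif : (if p.1 == q.1 then ([] : List (String × String)) else [p]) = [] := by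
          simp [hpq]
        rw [hif, List.nil_append, ih htl]
        by_cases hk : p.1 == k
        · have hqk : (q.1 == k) = true := by rw [← hpq']; exact hk
          rw [List.filter_cons_of_pos (p := fun q : String × String => q.1 == k) hk,
            List.filter_cons_of_pos (p := fun q : String × String => q.1 == k) hqk, List.getLast?_cons_cons]
        · rw [List.filter_cons_of_neg (p := fun q : String × String => q.1 == k) hk]
      · have hif : (if p.1 == q.1 then ([] : List (String × String)) else [p]) = [p] := by
          simp [hpq]
        rw [hif, List.singleton_append]
        have hgt : ∀ r ∈ q :: t, p.1 < r.1 := by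
          intro r hrm
          have hlt : p.1 < q.1 := lt_of_le_of_ne (hp q (by simp)) (by simpa using hpq)
          rcases List.mem_cons.1 hrm with rfl | hrt
          · exact hlt
          · exact lt_of_lt_of_le hlt ((List.pairwise_cons.1 htl).1 r hrt)
        by_cases hk : p.1 == k
        · have hk' : p.1 = k := by simpa using hk
          have hfil : (q :: t).filter (fun p => p.1 == k) = [] := by
            rw [List.filter_eq_nil_iff]
            intro r hrm
            have := hgt r hrm
            simp only [beq_iff_eq]
            intro hc; rw [← hk'] at hc; exact absurd hc (ne_of_gt this)
          rw [List.find?_cons_of_pos (p := fun q : String × String => q.1 == k) hk,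
            List.filter_cons_of_pos (p := fun q : String × String => q.1 == k) hk, hfil]; rfl
        · rw [List.find?_cons_of_neg (p := fun q : String × String => q.1 == k) hk, ih htl,
            List.filter_cons_of_neg (p := fun q : String × String => q.1 == k) hk]

-- membership of a key, through find?.isSome
theorem pv_mem_map_fst_iff_find? (l : List (String × String)) (k : String) :
    k ∈ l.map Prod.fst ↔ (l.find? (fun p => p.1 == k)).isSome := by
  rw [List.find?_isSome]
  constructor
  · intro h
    rcases List.mem_map.1 h with ⟨p, hp, rfl⟩
    exact ⟨p, hp, by simp⟩
  · rintro ⟨p, hp, hk⟩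
    exact List.mem_map.2 ⟨p, hp, beq_iff_eq.1 hk⟩

-- find? of a member in a list with distinct keys returns that member
theorem pv_find?_of_mem (l : List (String × String)) (hnd : (l.map Prod.fst).Nodup)
    (p : String × String) (hp : p ∈ l) :
    l.find? (fun q => q.1 == p.1) = some p := by
  induction l with
  | nil => cases hp
  | cons x l ih =>
    rcases List.mem_cons.1 hp with rfl | hpl
    · exact List.find?_cons_of_pos (by simp)
    · have hx : ¬(x.1 == p.1) = true := by
        have hnm : x.1 ∉ l.map Prod.fst := (List.nodup_cons.1 hnd).1
        intro hc
        exact hnm (List.mem_map.2 ⟨p, hpl, (beq_iff_eq.1 hc).symm⟩)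
      rw [List.find?_cons_of_neg (p := fun q : String × String => q.1 == p.1) hx]
      exact ih (List.nodup_cons.1 hnd).2 hpl

-- stability of PySem's insertion sort w.r.t. a key-filter
theorem pv_stab_insertBy (x : String × String) (ys : List (String × String)) (k : String)
    (h : ys.Pairwise (fun a b => a.1 ≤ b.1)) :
    (PySem.List.insertBy (fun a b => decide (a.1 < b.1)) x ys).filter (fun p => p.1 == k)
      = if x.1 == k then ys.filter (fun p => p.1 == k) ++ [x]
        else ys.filter (fun p => p.1 == k) := by
  induction ys with
  | nil =>
    by_cases hk : x.1 == k <;> simp [PySem.List.insertBy, List.filter, hk]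
  | cons y ys ih =>
    rcases List.pairwise_cons.1 h with ⟨hy, htl⟩
    by_cases hlt : x.1 < y.1
    · have hins : PySem.List.insertBy (fun a b => decide (a.1 < b.1)) x (y :: ys) = x :: y :: ys := by
        simp [PySem.List.insertBy, hlt]
      rw [hins]
      by_cases hk : x.1 == k
      · have hk' : x.1 = k := by simpa using hk
        have hfil : (y :: ys).filter (fun p => p.1 == k) = [] := by
          rw [List.filter_eq_nil_iff]
          intro r hrm
          have hge : y.1 ≤ r.1 := by
            rcases List.mem_cons.1 hrm with rfl | hrt
            · exact le_refl _
            · exact hy r hrt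
          simp only [beq_iff_eq]
          intro hc; rw [← hk'] at hc
          exact absurd hc (ne_of_lt (lt_of_lt_of_le hlt hge)).symm
        rw [List.filter_cons_of_pos (p := fun q : String × String => q.1 == k) hk, hfil, if_pos hk]
        rfl
      · rw [List.filter_cons_of_neg (p := fun q : String × String => q.1 == k) hk, if_neg hk]
    · have hins : PySem.List.insertBy (fun a b => decide (a.1 < b.1)) x (y :: ys)
          = y :: PySem.List.insertBy (fun a b => decide (a.1 < b.1)) x ys := by
        simp [PySem.List.insertBy, hlt]
      rw [hins]
      by_cases hyk : y.1 == k
      · rw [List.filter_cons_of_pos (p := fun q : String × String => q.1 == k) hyk,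
          List.filter_cons_of_pos (p := fun q : String × String => q.1 == k) hyk, ih htl]
        by_cases hk : x.1 == k
        · rw [if_pos hk, if_pos hk]; rfl
        · rw [if_neg hk, if_neg hk]
      · rw [List.filter_cons_of_neg (p := fun q : String × String => q.1 == k) hyk,
          List.filter_cons_of_neg (p := fun q : String × String => q.1 == k) hyk, ih htl]

-- the stable sort preserves the subsequence of pairs with a given key
theorem pv_sorted_filter_eq (l : List (String × String)) (k : String) :
    (PySem.List.sorted l (fun p => p.1) false).filter (fun p => p.1 == k)
      = l.filter (fun p => p.1 == k) := by
  induction l using List.reverseRecOn with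
  | nil => simp [PySem.List.sorted_eq_foldl_insertBy]
  | append_singleton l x ih =>
    have hfold : PySem.List.sorted (l ++ [x]) (fun p => p.1) false
        = PySem.List.insertBy (fun a b => decide (a.1 < b.1)) x
            (PySem.List.sorted l (fun p => p.1) false) := by
      rw [PySem.List.sorted_eq_foldl_insertBy, PySem.List.sorted_eq_foldl_insertBy,
        List.foldl_append, List.foldl_cons, List.foldl_nil]
    rw [hfold, pv_stab_insertBy x _ k (PySem.List.sorted_pairwise l (fun p => p.1)),
      List.filter_append]
    by_cases hk : x.1 == k
    · rw [if_pos hk, ih, List.filter_cons_of_pos (p := fun q : String × String => q.1 == k) hk]; rfl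
    · rw [if_neg hk, ih, List.filter_cons_of_neg (p := fun q : String × String => q.1 == k) hk,
        List.filter_nil, List.append_nil]

-- the dict A builds looks up the LAST pair with the given key
theorem pv_get?_buildMap (rows : List (List (String × String))) (k : String) :
    (pvBuildMap rows).get? k
      = ((pvPairs rows).filter (fun p => p.1 == k)).getLast?.map (fun p => p.2) := by
  induction rows using List.reverseRecOn with
  | nil => rfl
  | append_singleton rows r ih =>
    have h1 : pvBuildMap (rows ++ [r])
        = (pvBuildMap rows).insert (pvRowGet r "ruta_completa" "") (pvRowGet r "sha256" "") := by
      rw [pvBuildMap, List.foldl_append, List.foldl_cons, List.foldl_nil]; rfl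
    have h2 : pvPairs (rows ++ [r])
        = pvPairs rows ++ [(pvRowGet r "ruta_completa" "", pvRowGet r "sha256" "")] := by
      simp [pvPairs]
    rw [h1, h2, List.filter_append]
    by_cases hk : pvRowGet r "ruta_completa" "" = k
    · rw [hk, PySem.Dict.get?_insert_self]
      have : List.filter (fun p => p.1 == k) [((k : String), pvRowGet r "sha256" "")]
          = [(k, pvRowGet r "sha256" "")] := by simp
      rw [← hk] at this ⊢
      simp
    · rw [PySem.Dict.get?_insert_of_ne _ _ (fun hc => hk hc.symm), ih]
      have : List.filter (fun p => p.1 == k)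
          [(pvRowGet r "ruta_completa" "", pvRowGet r "sha256" "")] = [] := by simp [hk]
      rw [this, List.append_nil]

theorem pv_nodup_keys_buildMap (rows : List (List (String × String))) : (pvBuildMap rows).keys.Nodup := by
  unfold pvBuildMap
  exact PySem.Dict.nodup_keys_foldl_insert_key rows _ _ _ PySem.Dict.nodup_keys_empty

theorem pv_mem_keys_buildMap (rows : List (List (String × String))) (k : String) :
    k ∈ (pvBuildMap rows).keys ↔ k ∈ (pvPairs rows).map Prod.fst := by
  have h1 : (pvBuildMap rows).contains k = ((pvBuildMap rows).get? k).isSome :=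
    PySem.Dict.contains_eq_isSome_get? _ _
  have h2 : (pvBuildMap rows).contains k = decide (k ∈ (pvBuildMap rows).keys) :=
    PySem.Dict.contains_eq_decide_mem_keys _ _
  rw [pv_get?_buildMap] at h1
  constructor
  · intro hm
    have hc : (pvBuildMap rows).contains k = true := by rw [h2]; simpa using hm
    rw [h1] at hc
    have : ((pvPairs rows).filter (fun p => p.1 == k)).getLast?.isSome := by
      simpa using hc
    rw [List.getLast?_isSome] at this
    rcases List.exists_mem_of_ne_nil _ this with ⟨p, hp⟩
    rcases List.mem_filter.1 hp with ⟨hpm, hpk⟩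
    exact List.mem_map.2 ⟨p, hpm, beq_iff_eq.1 hpk⟩
  · intro hm
    rcases List.mem_map.1 hm with ⟨p, hp, rfl⟩
    have hne : (pvPairs rows).filter (fun q => q.1 == p.1) ≠ [] := by
      intro hc
      have : p ∈ (pvPairs rows).filter (fun q => q.1 == p.1) := List.mem_filter.2 ⟨hp, by simp⟩
      rw [hc] at this; exact absurd this (by simp)
    have hsome : ((pvPairs rows).filter (fun q => q.1 == p.1)).getLast?.isSome :=
      List.getLast?_isSome.2 hne
    have hdec : decide (p.1 ∈ (pvBuildMap rows).keys) = true := by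
      rw [← h2, h1]; simpa using hsome
    simpa using hdec

-- the snapshot's pairs: strictly increasing keys, the same key set, and get? agreement
theorem pv_snap_pairwise (rows : List (List (String × String))) :
    (pvSnapshot rows).Pairwise (fun a b => a.1 < b.1) :=
  pvKL_pairwise _ (PySem.List.sorted_pairwise _ _)

theorem pv_snap_nodup_keys (rows : List (List (String × String))) :
    ((pvSnapshot rows).map Prod.fst).Nodup := by
  have h := (pv_snap_pairwise rows).map Prod.fst (fun {a b} h => h)
  exact h.imp (fun {a b} (h : a < b) => ne_of_lt h)

theorem pv_snap_find (rows : List (List (String × String))) (k : String) :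
    (pvSnapshot rows).find? (fun p => p.1 == k)
      = ((pvPairs rows).filter (fun p => p.1 == k)).getLast? := by
  rw [pvSnapshot, pvKL_find _ (PySem.List.sorted_pairwise _ _) k, pv_sorted_filter_eq]

theorem pv_snap_mem_keys (rows : List (List (String × String))) (k : String) :
    k ∈ (pvSnapshot rows).map Prod.fst ↔ k ∈ (pvBuildMap rows).keys := by
  rw [pv_mem_map_fst_iff_find?, pv_snap_find, pv_mem_keys_buildMap, List.getLast?_isSome]
  constructor
  · intro hne
    rcases List.exists_mem_of_ne_nil _ hne with ⟨p, hp⟩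
    rcases List.mem_filter.1 hp with ⟨hpm, hpk⟩
    exact List.mem_map.2 ⟨p, hpm, beq_iff_eq.1 hpk⟩
  · intro hm
    rcases List.mem_map.1 hm with ⟨p, hp, rfl⟩
    intro hc
    have : p ∈ (pvPairs rows).filter (fun q => q.1 == p.1) := List.mem_filter.2 ⟨hp, by simp⟩
    rw [hc] at this; exact absurd this (by simp)

theorem pv_get?_eq_snap_find (rows : List (List (String × String))) (k : String) :
    (pvBuildMap rows).get? k = ((pvSnapshot rows).find? (fun p => p.1 == k)).map (fun p => p.2) := by
  rw [pv_get?_buildMap, pv_snap_find]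

-- ===== the merge loop counts exactly the three quantities =====
theorem pv_merge_spec (cm : List (String × String)) :
    ∀ (pm : List (String × String)) (n e m : Int),
      pm.Pairwise (fun a b => a.1 < b.1) → cm.Pairwise (fun a b => a.1 < b.1) →
      pvMergeCount pm cm n e m
        = (n + (cm.countP (fun p => !(pm.map Prod.fst).contains p.1) : Int),
           e + (pm.countP (fun p => !(cm.map Prod.fst).contains p.1) : Int),
           m + (cm.countP (fun p => (pm.find? (fun q => q.1 == p.1)).any (fun q => q.2 != p.2)) : Int)) := by
  induction cm with
  | nil =>
    intro pm n e m _ _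
    cases pm with
    | nil => simp [pvMergeCount]
    | cons p pt => simp [pvMergeCount]
  | cons c ct ihc =>
    intro pm
    induction pm with
    | nil =>
      intro n e m _ _
      simp [pvMergeCount]
    | cons p pt ihp =>
      intro n e m hp hc
      obtain ⟨pr, ps⟩ := p
      obtain ⟨cr, cs⟩ := c
      rcases List.pairwise_cons.1 hp with ⟨hp1, hp2⟩
      rcases List.pairwise_cons.1 hc with ⟨hc1, hc2⟩
      by_cases h1 : pr < cr
      · -- eliminados: pr only in prev
        have hgtc : ∀ x ∈ (cr, cs) :: ct, pr < x.1 := by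
          intro x hx
          rcases List.mem_cons.1 hx with rfl | hxt
          · exact h1
          · exact lt_trans h1 (hc1 x hxt)
        have heq : pvMergeCount ((pr, ps) :: pt) ((cr, cs) :: ct) n e m
            = pvMergeCount pt ((cr, cs) :: ct) n (e + 1) m := by
          rw [pvMergeCount]; rw [if_pos h1]
        rw [heq, ihp (n := n) (e := e + 1) (m := m) hp2 hc]
        have hcn : (((cr, cs) :: ct).countP (fun p => !(((pr, ps) :: pt).map Prod.fst).contains p.1))
            = (((cr, cs) :: ct).countP (fun p => !(pt.map Prod.fst).contains p.1)) := by
          refine List.countP_congr ?_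
          intro x hx
          rw [List.map_cons, pv_contains_cons_ne _ _ _ (ne_of_gt (hgtc x hx))]
        have hce : (((pr, ps) :: pt).countP (fun p => !((((cr, cs) :: ct).map Prod.fst)).contains p.1))
            = (pt.countP (fun p => !((((cr, cs) :: ct).map Prod.fst)).contains p.1)) + 1 := by
          refine List.countP_cons_of_pos ?_
          have : pr ∉ ((cr, cs) :: ct).map Prod.fst := by
            intro hm
            rcases List.mem_map.1 hm with ⟨x, hx, hxe⟩
            exact absurd hxe (ne_of_gt (hgtc x hx))
          rw [pv_contains_false _ _ this]; rfl
        have hcm : (((cr, cs) :: ct).countP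
              (fun p => (((pr, ps) :: pt).find? (fun q => q.1 == p.1)).any (fun q => q.2 != p.2)))
            = (((cr, cs) :: ct).countP
              (fun p => (pt.find? (fun q => q.1 == p.1)).any (fun q => q.2 != p.2))) := by
          refine List.countP_congr ?_
          intro x hx
          rw [List.find?_cons_of_neg (p := fun q : String × String => q.1 == x.1)
            (by simpa using (ne_of_lt (hgtc x hx)))]
        rw [hcn, hce, hcm]
        refine Prod.ext rfl (Prod.ext ?_ rfl)
        simp only []
        push_cast
        ring
      · by_cases h2 : cr < pr
        · -- nuevos: cr only in curr
          have hgtp : ∀ x ∈ (pr, ps) :: pt, cr < x.1 := by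
            intro x hx
            rcases List.mem_cons.1 hx with rfl | hxt
            · exact h2
            · exact lt_trans h2 (hp1 x hxt)
          have heq : pvMergeCount ((pr, ps) :: pt) ((cr, cs) :: ct) n e m
              = pvMergeCount ((pr, ps) :: pt) ct (n + 1) e m := by
            rw [pvMergeCount]; rw [if_neg h1, if_pos h2]
          rw [heq, ihc ((pr, ps) :: pt) (n + 1) e m hp hc2]
          have hnotin : cr ∉ ((pr, ps) :: pt).map Prod.fst := by
            intro hm
            rcases List.mem_map.1 hm with ⟨x, hx, hxe⟩
            exact absurd hxe (ne_of_gt (hgtp x hx))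
          have hcn : (((cr, cs) :: ct).countP (fun p => !(((pr, ps) :: pt).map Prod.fst).contains p.1))
              = (ct.countP (fun p => !(((pr, ps) :: pt).map Prod.fst).contains p.1)) + 1 := by
            refine List.countP_cons_of_pos ?_
            rw [pv_contains_false _ _ hnotin]; rfl
          have hce : (((pr, ps) :: pt).countP (fun p => !((((cr, cs) :: ct).map Prod.fst)).contains p.1))
              = (((pr, ps) :: pt).countP (fun p => !((ct.map Prod.fst)).contains p.1)) := by
            refine List.countP_congr ?_
            intro x hx
            rw [List.map_cons, pv_contains_cons_ne _ _ _ (ne_of_gt (hgtp x hx))]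
          have hcm : (((cr, cs) :: ct).countP
                (fun p => (((pr, ps) :: pt).find? (fun q => q.1 == p.1)).any (fun q => q.2 != p.2)))
              = (ct.countP
                (fun p => (((pr, ps) :: pt).find? (fun q => q.1 == p.1)).any (fun q => q.2 != p.2))) := by
            refine List.countP_cons_of_neg ?_
            rw [pv_find?_none _ _ (fun x hx => ne_of_lt (hgtp x hx))]
            simp
          rw [hcn, hce, hcm]
          refine Prod.ext ?_ rfl
          simp only []
          push_cast
          ring
        · -- equal keys
          have hpc : pr = cr := le_antisymm (le_of_not_gt h2) (le_of_not_gt h1)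
          subst hpc
          have hgtp : ∀ x ∈ pt, pr < x.1 := hp1
          have hgtc : ∀ x ∈ ct, pr < x.1 := hc1
          have hnp : pr ∉ pt.map Prod.fst := by
            intro hm
            rcases List.mem_map.1 hm with ⟨x, hx, hxe⟩
            exact absurd hxe (ne_of_gt (hgtp x hx))
          have hnc : pr ∉ ct.map Prod.fst := by
            intro hm
            rcases List.mem_map.1 hm with ⟨x, hx, hxe⟩
            exact absurd hxe (ne_of_gt (hgtc x hx))
          have hcn : (((pr, cs) :: ct).countP (fun p => !(((pr, ps) :: pt).map Prod.fst).contains p.1))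
              = (ct.countP (fun p => !(pt.map Prod.fst).contains p.1)) := by
            rw [List.countP_cons_of_neg
              (p := fun p : String × String => !(((pr, ps) :: pt).map Prod.fst).contains p.1)
              (by simp)]
            refine List.countP_congr ?_
            intro x hx
            rw [List.map_cons, pv_contains_cons_ne _ _ _ (ne_of_gt (hgtc x hx))]
          have hce : (((pr, ps) :: pt).countP (fun p => !((((pr, cs) :: ct).map Prod.fst)).contains p.1))
              = (pt.countP (fun p => !((ct.map Prod.fst)).contains p.1)) := by
            rw [List.countP_cons_of_neg
              (p := fun p : String × String => !(((pr, cs) :: ct).map Prod.fst).contains p.1)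
              (by simp)]
            refine List.countP_congr ?_
            intro x hx
            rw [List.map_cons, pv_contains_cons_ne _ _ _ (ne_of_gt (hgtp x hx))]
          have hcm : (((pr, cs) :: ct).countP
                (fun p => (((pr, ps) :: pt).find? (fun q => q.1 == p.1)).any (fun q => q.2 != p.2)))
              = (ct.countP
                  (fun p => (pt.find? (fun q => q.1 == p.1)).any (fun q => q.2 != p.2)))
                + (if ps != cs then 1 else 0) := by
            have hhead : (((pr, ps) :: pt).find? (fun q => q.1 == (pr, cs).1)).any
                (fun q => q.2 != (pr, cs).2) = (ps != cs) := by
              rw [List.find?_cons_of_pos (p := fun q : String × String => q.1 == (pr, cs).1) (by simp)]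
              rfl
            have htail : (ct.countP
                  (fun p => (((pr, ps) :: pt).find? (fun q => q.1 == p.1)).any (fun q => q.2 != p.2)))
                = (ct.countP
                  (fun p => (pt.find? (fun q => q.1 == p.1)).any (fun q => q.2 != p.2))) := by
              refine List.countP_congr ?_
              intro x hx
              rw [List.find?_cons_of_neg (p := fun q : String × String => q.1 == x.1)
            (by simpa using (ne_of_lt (hgtc x hx)))]
            by_cases hne : ps != cs
            · rw [List.countP_cons_of_pos
                (p := fun p : String × String => (((pr, ps) :: pt).find? (fun q => q.1 == p.1)).any (fun q => q.2 != p.2))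
                (by simp only [hhead]; exact hne), htail, if_pos hne]
            · rw [List.countP_cons_of_neg
                (p := fun p : String × String => (((pr, ps) :: pt).find? (fun q => q.1 == p.1)).any (fun q => q.2 != p.2))
                (by simp only [hhead]; exact hne), htail, if_neg hne]
              simp
          by_cases hne : ps != cs
          · have heq : pvMergeCount ((pr, ps) :: pt) ((pr, cs) :: ct) n e m
                = pvMergeCount pt ct n e (m + 1) := by
              rw [pvMergeCount]; rw [if_neg h1, if_neg h2, if_pos hne]
            rw [heq, ihc pt n e (m + 1) hp2 hc2, hcn, hce, hcm, if_pos hne]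
            refine Prod.ext rfl (Prod.ext rfl ?_)
            simp only []
            push_cast
            ring
          · have heq : pvMergeCount ((pr, ps) :: pt) ((pr, cs) :: ct) n e m
                = pvMergeCount pt ct n e m := by
              rw [pvMergeCount]; rw [if_neg h1, if_neg h2, if_neg hne]
            rw [heq, ihc pt n e m hp2 hc2, hcn, hce, hcm, if_neg hne]
            refine Prod.ext rfl (Prod.ext rfl ?_)
            simp only []
            push_cast
            ring

-- ===== A-side reduction and final assembly =====
theorem pv_contains_keys (P : PySem.Dict String String) (k : String) :
    P.contains k = List.contains P.keys k := by
  rw [PySem.Dict.contains_eq_decide_mem_keys]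
  simp

theorem pv_final (prev curr : List (List (String × String))) :
    comparar_hashes_py prev curr = comparar_hashes_py_alt prev curr := by
  have hP := pv_nodup_keys_buildMap prev
  have hC := pv_nodup_keys_buildMap curr
  have hpmnd := pv_snap_nodup_keys prev
  have hcmnd := pv_snap_nodup_keys curr
  have hpermP : ((pvSnapshot prev).map Prod.fst).Perm (pvBuildMap prev).keys :=
    (List.perm_ext_iff_of_nodup hpmnd hP).2 (pv_snap_mem_keys prev)
  have hpermC : ((pvSnapshot curr).map Prod.fst).Perm (pvBuildMap curr).keys :=
    (List.perm_ext_iff_of_nodup hcmnd hC).2 (pv_snap_mem_keys curr)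
  simp only [comparar_hashes_py, comparar_hashes_py_alt]
  rw [pv_merge_spec _ _ _ _ _ (pv_snap_pairwise prev) (pv_snap_pairwise curr)]
  rw [PySem.Set.ofList_eq_self_of_nodup _ hP, PySem.Set.ofList_eq_self_of_nodup _ hC]
  have hnodupM : (((PySem.Set.inter (pvBuildMap curr).keys (pvBuildMap prev).keys)).filter
      (fun r => !((pvBuildMap prev).get? r == (pvBuildMap curr).get? r))).Nodup :=
    List.Nodup.filter _ (List.Nodup.filter _ hC)
  rw [PySem.Set.ofList_eq_self_of_nodup _ hnodupM]
  simp only [PySem.Set.diff, PySem.Set.inter, PySem.Set.len, PySem.Set.contains_eq_listContains,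
    zero_add]
  -- three component equalities
  have hkeysP : ∀ x, x ∈ (pvBuildMap prev).keys ↔ x ∈ (pvSnapshot prev).map Prod.fst :=
    fun x => (pv_snap_mem_keys prev x).symm
  have hkeysC : ∀ x, x ∈ (pvBuildMap curr).keys ↔ x ∈ (pvSnapshot curr).map Prod.fst :=
    fun x => (pv_snap_mem_keys curr x).symm
  have hnue : ((List.filter (fun x => !(List.contains (pvBuildMap prev).keys x))
        (pvBuildMap curr).keys).length : Int)
      = ((pvSnapshot curr).countP (fun p => !((pvSnapshot prev).map Prod.fst).contains p.1) : Int) := by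
    rw [← List.countP_eq_length_filter]
    congr 1
    calc (pvBuildMap curr).keys.countP (fun x => !(List.contains (pvBuildMap prev).keys x))
        = ((pvSnapshot curr).map Prod.fst).countP (fun x => !(List.contains (pvBuildMap prev).keys x)) :=
          (hpermC.countP_eq _).symm
      _ = ((pvSnapshot curr).map Prod.fst).countP (fun x => !((pvSnapshot prev).map Prod.fst).contains x) := by
          refine List.countP_congr ?_
          intro x _
          rw [pv_contains_eq_of_iff _ _ hkeysP x]
      _ = (pvSnapshot curr).countP (fun p => !((pvSnapshot prev).map Prod.fst).contains p.1) :=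
          List.countP_map
  have heli : ((List.filter (fun x => !(List.contains (pvBuildMap curr).keys x))
        (pvBuildMap prev).keys).length : Int)
      = ((pvSnapshot prev).countP (fun p => !((pvSnapshot curr).map Prod.fst).contains p.1) : Int) := by
    rw [← List.countP_eq_length_filter]
    congr 1
    calc (pvBuildMap prev).keys.countP (fun x => !(List.contains (pvBuildMap curr).keys x))
        = ((pvSnapshot prev).map Prod.fst).countP (fun x => !(List.contains (pvBuildMap curr).keys x)) :=
          (hpermP.countP_eq _).symm
      _ = ((pvSnapshot prev).map Prod.fst).countP (fun x => !((pvSnapshot curr).map Prod.fst).contains x) := by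
          refine List.countP_congr ?_
          intro x _
          rw [pv_contains_eq_of_iff _ _ hkeysC x]
      _ = (pvSnapshot prev).countP (fun p => !((pvSnapshot curr).map Prod.fst).contains p.1) :=
          List.countP_map
  have hmod : ((List.filter (fun r => !((pvBuildMap prev).get? r == (pvBuildMap curr).get? r))
        (List.filter (fun x => List.contains (pvBuildMap prev).keys x) (pvBuildMap curr).keys)).length : Int)
      = ((pvSnapshot curr).countP
          (fun p => ((pvSnapshot prev).find? (fun q => q.1 == p.1)).any (fun q => q.2 != p.2)) : Int) := by
    rw [List.filter_filter, ← List.countP_eq_length_filter]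
    congr 1
    calc (pvBuildMap curr).keys.countP
          (fun a => !((pvBuildMap prev).get? a == (pvBuildMap curr).get? a)
            && List.contains (pvBuildMap prev).keys a)
        = ((pvSnapshot curr).map Prod.fst).countP
          (fun a => !((pvBuildMap prev).get? a == (pvBuildMap curr).get? a)
            && List.contains (pvBuildMap prev).keys a) := (hpermC.countP_eq _).symm
      _ = (pvSnapshot curr).countP
          (fun p => !((pvBuildMap prev).get? p.1 == (pvBuildMap curr).get? p.1)
            && List.contains (pvBuildMap prev).keys p.1) := List.countP_map
      _ = (pvSnapshot curr).countP
          (fun p => ((pvSnapshot prev).find? (fun q => q.1 == p.1)).any (fun q => q.2 != p.2)) := by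
          refine List.countP_congr ?_
          intro p hp
          have hCg : (pvBuildMap curr).get? p.1 = some p.2 := by
            rw [pv_get?_eq_snap_find, pv_find?_of_mem _ hcmnd p hp]; rfl
          have hPg := pv_get?_eq_snap_find prev p.1
          have hcont : List.contains (pvBuildMap prev).keys p.1
              = ((pvBuildMap prev).get? p.1).isSome := by
            rw [← pv_contains_keys, PySem.Dict.contains_eq_isSome_get?]
          rw [hCg, hPg, hcont, hPg]
          cases hf : (pvSnapshot prev).find? (fun q => q.1 == p.1) with
          | none => simp
          | some q => simp [bne]
  rw [hnue, heli, hmod]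

-- ===== VERDICT (by name: the statement is the Claim_ definition above) =====
theorem comparar_hashes_py_spec : Claim_equal_comparar_hashes_py := by
  intro prev curr _
  unfold Spec_comparar_hashes_py
  exact pv_final prev curr
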